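-- pv_equiv track=rewrite | github.com/tygwan/DXTnavis | _archive/fastapi_server/routers/navisworks.py | sanitize_property_value
-- ===== SOURCE A (Python) =====
-- from typing import Any, Dict, List, Optional, Sequence
--
-- def sanitize_property_value(value: Optional[str]) -> Optional[str]:
--     if value is None:
--         return None
--     value = value.strip()
--     for prefix in ("DisplayString:", "NamedConstant:", "Boolean:", "Double:", "Integer:"):
--         if value.startswith(prefix):
--             return value[len(prefix) :].strip()
--     return value
-- ===== SOURCE B (Python) =====
-- _PREFIX_NAMES = frozenset({"DisplayString", "NamedConstant", "Boolean", "Double", "Integer"})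
--
-- def sanitize_property_value(value):
--     if value is None:
--         return None
--     value = value.strip()
--     head, sep, rest = value.partition(":")
--     if sep and head in _PREFIX_NAMES:
--         return rest.strip()
--     return value
-- ===== Notes on version B (the rewrite author's own statement) =====
-- stated objective: idiomatic
-- what changed: Replaces the loop that tries each 'Type:' prefix with startswith and slicing by a single partition at the first colon followed by a set-membership test of the type token.
import Mathlib
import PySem

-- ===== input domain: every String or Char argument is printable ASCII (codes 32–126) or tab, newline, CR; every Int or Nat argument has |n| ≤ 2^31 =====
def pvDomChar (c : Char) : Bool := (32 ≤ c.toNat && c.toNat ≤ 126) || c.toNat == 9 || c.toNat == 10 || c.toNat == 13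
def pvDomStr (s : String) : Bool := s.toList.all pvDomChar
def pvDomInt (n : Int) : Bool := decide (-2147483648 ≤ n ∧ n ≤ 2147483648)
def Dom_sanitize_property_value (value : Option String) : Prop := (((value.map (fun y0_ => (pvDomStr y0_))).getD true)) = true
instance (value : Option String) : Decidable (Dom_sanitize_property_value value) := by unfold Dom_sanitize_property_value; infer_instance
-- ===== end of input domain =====

set_option maxRecDepth 8000


-- B replaces A's per-prefix startswith loop by one partition at the first colon plus a
-- set-membership test of the type token (idiomatic; same behaviour).

-- ===== PORT A =====
-- the for-loop over the prefix tuple; first match returns value[len(prefix):].strip()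
def pvALoop (prefixes : List String) (v : String) : String :=
  match prefixes with
  | [] => v
  | p :: ps =>
    if PySem.Str.startswith v p then
      PySem.Str.strip (PySem.Str.slice v (some (PySem.Str.len p)) none)
    else pvALoop ps v

def sanitize_property_value (value : Option String) : Option String :=
  match value with
  | none => none
  | some v =>
    let v := PySem.Str.strip v
    some (pvALoop ["DisplayString:", "NamedConstant:", "Boolean:", "Double:", "Integer:"] v)

-- ===== PORT B =====
-- str.partition(':') ported by hand (PySem has no partition): exact — Python splits at the
-- FIRST occurrence of ':', returning (s, '', '') when ':' is absent.
def pvPartitionColon (s : String) : String × String × String :=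
  let cs := s.toList
  match cs.dropWhile (· ≠ ':') with
  | [] => (s, "", "")
  | _ :: rest => (String.ofList (cs.takeWhile (· ≠ ':')), ":", String.ofList rest)

def pvPrefixNames : List String := ["DisplayString", "NamedConstant", "Boolean", "Double", "Integer"]

def sanitize_property_value_alt (value : Option String) : Option String :=
  match value with
  | none => none
  | some v =>
    let v := PySem.Str.strip v
    let parts := pvPartitionColon v
    if parts.2.1 != "" && pvPrefixNames.contains parts.1 then
      some (PySem.Str.strip parts.2.2)
    else some v

-- ===== PRECONDITION & SPEC =====
def Spec_sanitize_property_value (value : Option String) (out : Option String) : Prop := out = sanitize_property_value_alt value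
instance (value : Option String) (out : Option String) : Decidable (Spec_sanitize_property_value value out) := by unfold Spec_sanitize_property_value; infer_instance

-- ===== CLAIM (what is proved, stated in full; the proofs are below) =====
def Claim_equal_sanitize_property_value : Prop := ∀ (value : Option String), Dom_sanitize_property_value value → Spec_sanitize_property_value value (sanitize_property_value value)

-- ===== LEMMAS AND PROOFS =====

theorem pv_takeWhile_append (pred : Char → Bool) (p t : List Char)
    (hp : ∀ a ∈ p, pred a = true) (hc : pred ':' = false) :
    (p ++ ':' :: t).takeWhile pred = p := by
  induction p with
  | nil => simp [List.takeWhile_cons, hc]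
  | cons a p ih =>
    simp [List.takeWhile_cons, hp a (by simp), ih (fun b hb => hp b (by simp [hb]))]

-- startswith (P ++ ':') ↔ the token before the first colon is P
theorem pv_prefix_iff (P t l : List Char) (hp : ∀ a ∈ P, a ≠ ':')
    (hd : l.dropWhile (· ≠ ':') = ':' :: t) :
    (P ++ [':']) <+: l ↔ l.takeWhile (· ≠ ':') = P := by
  have hsplit : l = l.takeWhile (· ≠ ':') ++ ':' :: t := by
    conv_lhs => rw [← List.takeWhile_append_dropWhile (p := fun x => decide (x ≠ ':')) (l := l)]
    rw [hd]
  constructor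
  · rintro ⟨u, hu⟩
    have hl : l = P ++ ':' :: u := by simpa using hu.symm
    rw [hl]
    exact pv_takeWhile_append _ P u (fun a ha => by simp [hp a ha]) (by simp)
  · intro ht
    rw [hsplit, ht]
    exact ⟨t, by simp⟩

theorem pv_drop_of_take (P t l : List Char)
    (hd : l.dropWhile (· ≠ ':') = ':' :: t) (ht : l.takeWhile (· ≠ ':') = P) :
    l.drop (P.length + 1) = t := by
  have hsplit : l = (P ++ [':']) ++ t := by
    conv_lhs => rw [← List.takeWhile_append_dropWhile (p := fun x => decide (x ≠ ':')) (l := l)]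
    rw [hd, ht]; simp
  rw [hsplit, show P.length + 1 = (P ++ [':']).length by simp, List.drop_left]

theorem pv_no_colon_no_prefix (p l : List Char) (hp : ':' ∈ p) (hnc : ':' ∉ l) :
    ¬ p <+: l := fun h => hnc (h.sublist.mem hp)

-- on a hit, A's slice-then-strip equals B's strip of the partition remainder
theorem pv_hit (v : String) (t P : List Char) (n : Nat)
    (hd : v.toList.dropWhile (· ≠ ':') = ':' :: t)
    (ht : v.toList.takeWhile (· ≠ ':') = P) (hn : n = P.length + 1) :
    PySem.Str.strip (PySem.Str.slice v (some (n : Int)) none) =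
      PySem.Str.strip (String.ofList t) := by
  apply String.toList_inj.mp
  simp only [PySem.Str.toList_strip]
  congr 1
  simp only [PySem.Str.toList_slice, PySem.Chars.slice_eq_listSlice,
    PySem.List.slice_from_natCast, PySem.Chars.len_eq, String.toList_ofList]
  rw [hn]
  exact pv_drop_of_take P t v.toList hd ht

-- main per-string lemma: A's loop body equals B's partition/membership body
theorem pv_body_eq (v : String) :
    pvALoop ["DisplayString:", "NamedConstant:", "Boolean:", "Double:", "Integer:"] v =
      (let parts := pvPartitionColon v
       if parts.2.1 != "" && pvPrefixNames.contains parts.1 then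
         PySem.Str.strip parts.2.2
       else v) := by
  simp only [pvALoop, pvPartitionColon, PySem.Str.startswith_eq]
  rw [show ("DisplayString:" : String).toList = ("DisplayString" : String).toList ++ [':'] from by decide]
  rw [show ("NamedConstant:" : String).toList = ("NamedConstant" : String).toList ++ [':'] from by decide]
  rw [show ("Boolean:" : String).toList = ("Boolean" : String).toList ++ [':'] from by decide]
  rw [show ("Double:" : String).toList = ("Double" : String).toList ++ [':'] from by decide]
  rw [show ("Integer:" : String).toList = ("Integer" : String).toList ++ [':'] from by decide]
  cases hd : v.toList.dropWhile (· ≠ ':') with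
  | nil =>
    have hnc : ':' ∉ v.toList := by
      intro hm
      have := List.dropWhile_eq_nil_iff.mp hd ':' hm
      simp at this
    have hsw : ∀ P : List Char,
        PySem.Chars.startswith v.toList (P ++ [':']) = false := by
      intro P
      rw [Bool.eq_false_iff]
      intro h
      exact pv_no_colon_no_prefix (P ++ [':']) v.toList (by simp) hnc
        ((PySem.Chars.startswith_iff _ _).mp h)
    rw [hsw, hsw, hsw, hsw, hsw]
    simp
  | cons c t =>
    have hc : c = ':' := by
      have hne : v.toList.dropWhile (· ≠ ':') ≠ [] := by rw [hd]; simp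
      have h2 := List.head_dropWhile_not (p := fun x => decide (x ≠ ':')) (l := v.toList) hne
      simp only [hd, List.head_cons] at h2
      simpa using h2
    subst hc
    have hsw : ∀ P : List Char, (∀ a ∈ P, a ≠ ':') →
        PySem.Chars.startswith v.toList (P ++ [':']) =
          decide (v.toList.takeWhile (· ≠ ':') = P) := by
      intro P hp
      rw [Bool.eq_iff_iff]
      simp only [decide_eq_true_eq]
      rw [PySem.Chars.startswith_iff]
      exact pv_prefix_iff P t v.toList hp hd
    rw [hsw _ (by simp), hsw _ (by simp), hsw _ (by simp), hsw _ (by simp),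
      hsw _ (by simp)]
    have hcont : (((":" : String) != "") && pvPrefixNames.contains
        (String.ofList (v.toList.takeWhile (· ≠ ':')))) =
        decide (v.toList.takeWhile (· ≠ ':') = ("DisplayString" : String).toList ∨
          v.toList.takeWhile (· ≠ ':') = ("NamedConstant" : String).toList ∨
          v.toList.takeWhile (· ≠ ':') = ("Boolean" : String).toList ∨
          v.toList.takeWhile (· ≠ ':') = ("Double" : String).toList ∨
          v.toList.takeWhile (· ≠ ':') = ("Integer" : String).toList) := by
      rw [Bool.eq_iff_iff]
      simp only [decide_eq_true_eq, Bool.and_eq_true, bne_iff_ne, ne_eq,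
        List.contains_eq_mem, pvPrefixNames, List.mem_cons, List.not_mem_nil, or_false,
        decide_eq_true_eq, ← String.toList_inj, String.toList_ofList]
      constructor
      · rintro ⟨-, h⟩; exact h
      · intro h; exact ⟨by decide, h⟩
    simp only []
    rw [hcont]
    simp only [decide_eq_true_eq]
    by_cases h1 : v.toList.takeWhile (· ≠ ':') = ("DisplayString" : String).toList
    · rw [if_pos h1, if_pos (by exact Or.inl h1)]
      rw [show PySem.Str.len ("DisplayString:" : String) = ((14 : Nat) : Int) from by decide]
      exact pv_hit v t _ 14 hd h1 (by decide)
    · rw [if_neg h1]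
      by_cases h2 : v.toList.takeWhile (· ≠ ':') = ("NamedConstant" : String).toList
      · rw [if_pos h2, if_pos (by exact Or.inr (Or.inl h2))]
        rw [show PySem.Str.len ("NamedConstant:" : String) = ((14 : Nat) : Int) from by decide]
        exact pv_hit v t _ 14 hd h2 (by decide)
      · rw [if_neg h2]
        by_cases h3 : v.toList.takeWhile (· ≠ ':') = ("Boolean" : String).toList
        · rw [if_pos h3, if_pos (by exact Or.inr (Or.inr (Or.inl h3)))]
          rw [show PySem.Str.len ("Boolean:" : String) = ((8 : Nat) : Int) from by decide]
          exact pv_hit v t _ 8 hd h3 (by decide)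
        · rw [if_neg h3]
          by_cases h4 : v.toList.takeWhile (· ≠ ':') = ("Double" : String).toList
          · rw [if_pos h4, if_pos (by exact Or.inr (Or.inr (Or.inr (Or.inl h4))))]
            rw [show PySem.Str.len ("Double:" : String) = ((7 : Nat) : Int) from by decide]
            exact pv_hit v t _ 7 hd h4 (by decide)
          · rw [if_neg h4]
            by_cases h5 : v.toList.takeWhile (· ≠ ':') = ("Integer" : String).toList
            · rw [if_pos h5, if_pos (by exact Or.inr (Or.inr (Or.inr (Or.inr h5))))]
              rw [show PySem.Str.len ("Integer:" : String) = ((8 : Nat) : Int) from by decide]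
              exact pv_hit v t _ 8 hd h5 (by decide)
            · rw [if_neg h5, if_neg (by rintro (h|h|h|h|h); exacts [h1 h, h2 h, h3 h, h4 h, h5 h])]

-- ===== VERDICT (by name: the statement is the Claim_ definition above) =====
theorem sanitize_property_value_spec : Claim_equal_sanitize_property_value := by
  unfold Claim_equal_sanitize_property_value Spec_sanitize_property_value
  intro value _
  cases value with
  | none => rfl
  | some v =>
    show some (pvALoop _ (PySem.Str.strip v)) = _
    rw [pv_body_eq, apply_ite Option.some]
    rfl
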